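-- pv_equiv track=rewrite | github.com/cutehammond772/problem-solving-archive | 백준/Gold/4195. 친구 네트워크/친구 네트워크.py | find
-- ===== SOURCE A (Python) =====
-- def find(U, x):
-- 	if U[x] == x:
-- 		return U[x]
--
-- 	routes = [x]
--
-- 	while U[routes[-1]] != routes[-1]:
-- 		routes.append(U[routes[-1]])
--
-- 	for route in routes:
-- 		U[route] = routes[-1]
--
-- 	return U[x]
-- ===== SOURCE B (Python) =====
-- def find(U, x):
--     if U[x] == x:
--         return U[x]
--     U[x] = find(U, U[x])
--     return U[x]
-- ===== Notes on version B (the rewrite author's own statement) =====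
-- stated objective: idiomatic
-- what changed: A iteratively collects the whole parent path in an explicit routes list and then loops over it to rewrite parents; B is the textbook recursive find with path compression: one recursive call up the parent chain, compressing each node on the unwind, with no list and no second loop.
import Mathlib
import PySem

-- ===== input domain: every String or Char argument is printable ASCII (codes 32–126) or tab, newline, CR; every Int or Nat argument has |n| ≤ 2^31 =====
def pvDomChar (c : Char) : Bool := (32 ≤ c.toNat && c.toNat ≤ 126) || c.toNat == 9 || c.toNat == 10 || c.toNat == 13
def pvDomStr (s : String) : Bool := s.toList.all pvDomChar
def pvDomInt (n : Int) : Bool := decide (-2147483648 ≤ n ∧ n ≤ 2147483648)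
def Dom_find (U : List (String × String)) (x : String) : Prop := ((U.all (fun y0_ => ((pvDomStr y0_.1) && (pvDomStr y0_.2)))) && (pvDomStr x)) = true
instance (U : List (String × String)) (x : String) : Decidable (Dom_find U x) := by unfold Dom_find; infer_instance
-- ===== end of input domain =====

-- B replaces A's explicit routes list + rewrite loop with the textbook recursive
-- path-compression find (idiomatic). Both mutate the dict U identically; the equivalence
-- proved here is about the RETURN value (the two programs also perform the same mutation).

-- ===== PORT A =====
-- while U[routes[-1]] != routes[-1]: routes.append(U[routes[-1]])
-- (fuel-bounded structural recursion; Pre_find guarantees the fuel suffices)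
def findRoutesLoop (d : PySem.Dict String String) : Nat → List String → List String
  | 0, routes => routes
  | fuel + 1, routes =>
    let last := (PySem.List.pyGet? routes (-1)).getD ""
    let nxt := (PySem.Dict.get? d last).getD last
    if nxt = last then routes
    else findRoutesLoop d fuel (routes ++ [nxt])

def find (U : List (String × String)) (x : String) : String :=
  let d := PySem.Dict.ofList U
  let ux := (PySem.Dict.get? d x).getD x          -- U[x] (Pre_find: no KeyError)
  if ux = x then ux
  else
    let routes := findRoutesLoop d (U.length + 1) [x]
    let last := (PySem.List.pyGet? routes (-1)).getD ""
    let d' := routes.foldl (fun dd r => dd.insert r last) d   -- for route in routes: U[route] = routes[-1]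
    (PySem.Dict.get? d' x).getD x                 -- return U[x]

-- ===== PORT B =====
-- recursive find with path compression; the dict is threaded through the recursion
-- (Python mutates U in place); fuel-bounded, Pre_find guarantees the fuel suffices
def findRecAux (fuel : Nat) (d : PySem.Dict String String) (x : String) :
    PySem.Dict String String × String :=
  match fuel with
  | 0 => (d, x)
  | f + 1 =>
    let ux := (PySem.Dict.get? d x).getD x        -- U[x] (Pre_find: no KeyError)
    if ux = x then (d, ux)                        -- if U[x] == x: return U[x]
    else
      let dr := findRecAux f d ux                 -- find(U, U[x])
      let d'' := dr.1.insert x dr.2               -- U[x] = find(U, U[x])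
      (d'', (PySem.Dict.get? d'' x).getD x)       -- return U[x]

def find_alt (U : List (String × String)) (x : String) : String :=
  (findRecAux (U.length + 1) (PySem.Dict.ofList U) x).2

-- ===== PRECONDITION & SPEC =====
-- Pre_find holds exactly when Python's A returns: following parents from x, every node visited
-- is a key of dict(U) (else A raises KeyError) and a fixpoint U[y] == y is reached within
-- |U| steps (else A's while loop runs forever).  Checked via iterates of the parent map.
def Pre_find (U : List (String × String)) (x : String) : Prop :=
  ((List.range (U.length + 1)).any (fun n =>
    (List.range (n + 1)).all (fun i =>
      (PySem.Dict.ofList U).contains ((fun y => PySem.Dict.getD (PySem.Dict.ofList U) y y)^[i] x)) &&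
    ((fun y => PySem.Dict.getD (PySem.Dict.ofList U) y y)^[n + 1] x ==
     (fun y => PySem.Dict.getD (PySem.Dict.ofList U) y y)^[n] x))) = true
instance (U : List (String × String)) (x : String) : Decidable (Pre_find U x) := by
  unfold Pre_find; infer_instance

def pvWitness_find : (List (String × String)) × String := ([("a", "b"), ("b", "b")], "a")

def Spec_find (U : List (String × String)) (x : String) (out : String) : Prop := out = find_alt U x
instance (U : List (String × String)) (x : String) (out : String) : Decidable (Spec_find U x out) := by unfold Spec_find; infer_instance

-- ===== CLAIM (what is proved, stated in full; the proofs are below) =====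
def Claim_equal_find : Prop := ∀ (U : List (String × String)) (x : String), Dom_find U x → Pre_find U x → Spec_find U x (find U x)

-- ===== LEMMAS AND PROOFS =====

-- Proof-side characterisation of the parent chase: chaseRoot d fuel y = some r iff the walk
-- from y reaches the root r within fuel steps, every node looked up being a key of d.
def chaseRoot (d : PySem.Dict String String) : Nat → String → Option String
  | 0, _ => none
  | fuel + 1, y =>
    match PySem.Dict.get? d y with
    | none => none
    | some p => if p = y then some y else chaseRoot d fuel p

theorem chaseRoot_mono (d : PySem.Dict String String) (fuel fuel' : Nat) (y r : String)
    (h : chaseRoot d fuel y = some r) (hle : fuel ≤ fuel') :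
    chaseRoot d fuel' y = some r := by
  induction fuel generalizing fuel' y with
  | zero => simp [chaseRoot] at h
  | succ n ih =>
    obtain ⟨m, rfl⟩ : ∃ m, fuel' = m + 1 := ⟨fuel' - 1, by omega⟩
    simp only [chaseRoot] at h ⊢
    cases hg : PySem.Dict.get? d y with
    | none => simp [hg] at h
    | some p =>
      simp only [hg] at h ⊢
      by_cases hp : p = y
      · simpa [hp] using h
      · simp only [hp, if_false] at h ⊢
        exact ih _ p h (by omega)

-- From Pre_find's iterate form to chaseRoot.
theorem chaseRoot_of_iterate (d : PySem.Dict String String) (n : Nat) (x : String)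
    (hc : ∀ i, i ≤ n → d.contains ((fun y => PySem.Dict.getD d y y)^[i] x) = true)
    (hfix : (fun y => PySem.Dict.getD d y y)^[n + 1] x = (fun y => PySem.Dict.getD d y y)^[n] x) :
    ∃ r, chaseRoot d (n + 1) x = some r := by
  induction n generalizing x with
  | zero =>
    have h0 := hc 0 (le_refl 0)
    simp only [Function.iterate_zero, id_eq] at h0
    cases hg : PySem.Dict.get? d x with
    | none =>
      rw [PySem.Dict.contains_eq_isSome_get?, hg] at h0; simp at h0
    | some p =>
      have hpx : p = x := by
        have : PySem.Dict.getD d x x = x := by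
          simpa [Function.iterate_one] using hfix
        rwa [PySem.Dict.getD_eq_get?_getD, hg, Option.getD_some] at this
      exact ⟨x, by simp [chaseRoot, hg, hpx]⟩
  | succ m ih =>
    have h0 := hc 0 (Nat.zero_le _)
    simp only [Function.iterate_zero, id_eq] at h0
    cases hg : PySem.Dict.get? d x with
    | none =>
      rw [PySem.Dict.contains_eq_isSome_get?, hg] at h0; simp at h0
    | some p =>
      have hfx : PySem.Dict.getD d x x = p := by
        simp [PySem.Dict.getD_eq_get?_getD, hg]
      by_cases hp : p = x
      · exact ⟨x, by simp [chaseRoot, hg, hp]⟩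
      · have hc' : ∀ i, i ≤ m → d.contains ((fun y => PySem.Dict.getD d y y)^[i] p) = true := by
          intro i hi
          have := hc (i + 1) (by omega)
          rw [Function.iterate_succ_apply] at this
          rwa [hfx] at this
        have hfix' : (fun y => PySem.Dict.getD d y y)^[m + 1] p
            = (fun y => PySem.Dict.getD d y y)^[m] p := by
          have h2 : (fun y => PySem.Dict.getD d y y)^[m + 1] x
              = (fun y => PySem.Dict.getD d y y)^[m] p := by
            rw [Function.iterate_succ_apply, hfx]
          have h3 : (fun y => PySem.Dict.getD d y y)^[m + 1 + 1] x
              = (fun y => PySem.Dict.getD d y y)^[m + 1] p := by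
            rw [Function.iterate_succ_apply (n := m + 1), hfx]
          rw [← h3, ← h2]
          exact hfix
        obtain ⟨r, hr⟩ := ih p hc' hfix'
        refine ⟨r, ?_⟩
        rw [chaseRoot.eq_def]
        simpa [hg, hp] using hr

-- A's routes loop: if the chase from the current last element reaches root r, the final
-- routes list still contains every old element and its last element is r.
theorem findRoutesLoop_spec (d : PySem.Dict String String) (fuel : Nat) (routes : List String)
    (y r : String) (hlast : (PySem.List.pyGet? routes (-1)).getD "" = y)
    (hch : chaseRoot d fuel y = some r) :
    (PySem.List.pyGet? (findRoutesLoop d fuel routes) (-1)).getD "" = r ∧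
      ∀ z ∈ routes, z ∈ findRoutesLoop d fuel routes := by
  induction fuel generalizing routes y with
  | zero => simp [chaseRoot] at hch
  | succ n ih =>
    simp only [chaseRoot] at hch
    cases hg : PySem.Dict.get? d y with
    | none => simp [hg] at hch
    | some p =>
      simp only [hg] at hch
      simp only [findRoutesLoop, hlast, hg, Option.getD_some]
      by_cases hp : p = y
      · have hry : r = y := by simpa [hp] using hch.symm
        constructor
        · simp [hp, hlast, hry]
        · intro z hz; simpa [hp] using hz
      · simp only [hp, if_false] at hch ⊢
        have hlast' : (PySem.List.pyGet? (routes ++ [p]) (-1)).getD "" = p := by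
          rw [PySem.List.pyGet?_neg_one_append_singleton]; rfl
        obtain ⟨h1, h2⟩ := ih (routes ++ [p]) p hlast' hch
        exact ⟨h1, fun z hz => h2 z (List.mem_append_left _ hz)⟩

-- folding the same-value insert over a list containing x yields value `last` at key x
theorem get?_foldl_insert_const_of_get (d : PySem.Dict String String) (L : List String)
    (x v : String) (h : PySem.Dict.get? d x = some v) :
    PySem.Dict.get? (L.foldl (fun dd r => dd.insert r v) d) x = some v := by
  induction L generalizing d with
  | nil => simpa using h
  | cons a L ih =>
    simp only [List.foldl_cons]
    apply ih
    rw [PySem.Dict.get?_insert]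
    split_ifs with hx
    · rfl
    · exact h

theorem get?_foldl_insert_const_of_mem (d : PySem.Dict String String) (L : List String)
    (x v : String) (h : x ∈ L) :
    PySem.Dict.get? (L.foldl (fun dd r => dd.insert r v) d) x = some v := by
  induction L generalizing d with
  | nil => simp at h
  | cons a L ih =>
    simp only [List.foldl_cons]
    rcases List.mem_cons.mp h with rfl | hm
    · exact get?_foldl_insert_const_of_get _ _ _ _ (PySem.Dict.get?_insert_self _ _ _)
    · exact ih _ hm

-- A's port returns the chase root.
theorem find_eq_chaseRoot (U : List (String × String)) (x r : String)
    (hch : chaseRoot (PySem.Dict.ofList U) (U.length + 1) x = some r) :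
    find U x = r := by
  set d := PySem.Dict.ofList U with hd
  have hch1 : chaseRoot d (U.length + 1) x = some r := hch
  obtain ⟨m, hm⟩ : ∃ m, U.length + 1 = m + 1 := ⟨U.length, rfl⟩
  rw [hm] at hch1
  simp only [chaseRoot] at hch1
  cases hg : PySem.Dict.get? d x with
  | none => simp [hg] at hch1
  | some p =>
    simp only [hg] at hch1
    by_cases hp : p = x
    · -- first branch of A: U[x] == x
      have hrx : r = x := by simpa [hp] using hch1.symm
      simp [find, ← hd, hg, hp, hrx]
    · -- loop branch
      have hux : (PySem.Dict.get? d x).getD x = p := by simp [hg]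
      have hlast0 : (PySem.List.pyGet? ([x] : List String) (-1)).getD "" = x := by
        simp [PySem.List.pyGet?_neg_one]
      obtain ⟨hlastr, hmem⟩ := findRoutesLoop_spec d (U.length + 1) [x] x r hlast0 hch
      have hxmem : x ∈ findRoutesLoop d (U.length + 1) [x] := hmem x (by simp)
      simp only [find, ← hd, hux, hp, if_false]
      rw [hlastr,
        get?_foldl_insert_const_of_mem d (findRoutesLoop d (U.length + 1) [x]) x r hxmem]
      rfl

-- B's port returns the chase root.
theorem findRecAux_eq_chaseRoot (fuel : Nat) (d : PySem.Dict String String) (y r : String)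
    (hch : chaseRoot d fuel y = some r) : (findRecAux fuel d y).2 = r := by
  induction fuel generalizing y with
  | zero => simp [chaseRoot] at hch
  | succ n ih =>
    simp only [chaseRoot] at hch
    cases hg : PySem.Dict.get? d y with
    | none => simp [hg] at hch
    | some p =>
      simp only [hg] at hch
      simp only [findRecAux, hg, Option.getD_some]
      by_cases hp : p = y
      · have hry : r = y := by simpa [hp] using hch.symm
        simp [hp, hry]
      · simp only [hp, if_false] at hch ⊢
        have hrec := ih p hch
        simp [PySem.Dict.get?_insert_self, hrec]

theorem find_alt_eq_chaseRoot (U : List (String × String)) (x r : String)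
    (hch : chaseRoot (PySem.Dict.ofList U) (U.length + 1) x = some r) :
    find_alt U x = r := by
  simp only [find_alt]
  exact findRecAux_eq_chaseRoot _ _ _ _ hch

-- ===== VERDICT (by name: the statement is the Claim_ definition above) =====
theorem find_spec : Claim_equal_find := by
  intro U x _hdom hpre
  unfold Pre_find at hpre
  simp only [List.any_eq_true, List.mem_range, Bool.and_eq_true, List.all_eq_true, beq_iff_eq]
    at hpre
  obtain ⟨n, hn, hall, hfix⟩ := hpre
  have hc : ∀ i, i ≤ n →
      (PySem.Dict.ofList U).contains
        ((fun y => PySem.Dict.getD (PySem.Dict.ofList U) y y)^[i] x) = true := by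
    intro i hi; exact hall i (by omega)
  obtain ⟨r, hr⟩ := chaseRoot_of_iterate (PySem.Dict.ofList U) n x hc hfix
  have hr' : chaseRoot (PySem.Dict.ofList U) (U.length + 1) x = some r :=
    chaseRoot_mono _ _ _ _ _ hr (by omega)
  show find U x = find_alt U x
  rw [find_eq_chaseRoot U x r hr', find_alt_eq_chaseRoot U x r hr']
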